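-- pv_equiv track=rewrite | github.com/1ta/study_python | files/sun/practice/24dian_2.py | perm_3_ops
-- ===== SOURCE A (Python) =====
-- def perm_3_ops(ops, pre):
--     if len(pre) == 3:
--         return [pre]
--     out = []
--     for n in ops:
--         new_pre = pre.copy()
--         new_pre.append(n)
--         result = perm_3_ops(ops, new_pre)
--         out.extend(result)
--     return out
-- ===== SOURCE B (Python) =====
-- def perm_3_ops(ops, pre):
--     results = [list(pre)]
--     for _ in range(3 - len(pre)):
--         results = [r + [n] for r in results for n in ops]
--     return results
-- ===== Notes on version B (the rewrite author's own statement) =====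
-- stated objective: simpler
-- what changed: Replaces A's DFS recursion (copy prefix, recurse, extend) with a breadth-first iterative expansion: start from [list(pre)] and extend every partial sequence by one element per round, 3-len(pre) rounds.
-- outside the precondition, e.g. on perm_3_ops([], ['a', 'b', 'c', 'd']): A returns [], B returns [['a', 'b', 'c', 'd']]
import Mathlib
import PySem

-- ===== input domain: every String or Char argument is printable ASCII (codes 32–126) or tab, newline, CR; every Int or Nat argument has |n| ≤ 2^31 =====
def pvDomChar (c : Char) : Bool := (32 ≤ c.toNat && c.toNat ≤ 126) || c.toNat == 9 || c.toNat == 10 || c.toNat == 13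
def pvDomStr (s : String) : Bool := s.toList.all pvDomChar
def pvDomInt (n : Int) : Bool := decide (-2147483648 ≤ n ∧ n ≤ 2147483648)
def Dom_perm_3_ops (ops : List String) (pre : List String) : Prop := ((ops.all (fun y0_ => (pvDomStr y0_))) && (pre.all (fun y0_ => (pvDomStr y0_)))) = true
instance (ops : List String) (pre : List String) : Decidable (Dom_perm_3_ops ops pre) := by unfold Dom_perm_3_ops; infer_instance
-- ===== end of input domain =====

-- B replaces A's DFS recursion by a breadth-first iterative expansion (one round per
-- remaining position); same values, different decomposition (objective: simpler).

-- ===== PORT A =====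
-- A's recursion terminates only while the prefix can still grow to length 3; the fuel
-- bounds the recursion depth (4 suffices on Pre_, where pre.length ≤ 3). Fuel 0 is
-- reached only outside Pre_.
def perm3Fuel (fuel : Nat) (ops : List String) (pre : List String) : List (List String) :=
  match fuel with
  | 0 => []
  | fuel + 1 =>
    if pre.length = 3 then [pre]
    else ops.foldl (fun out n => out ++ perm3Fuel fuel ops (pre ++ [n])) []

def perm_3_ops (ops : List String) (pre : List String) : List (List String) :=
  perm3Fuel 4 ops pre

-- ===== PORT B =====
def perm_3_ops_alt (ops : List String) (pre : List String) : List (List String) :=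
  (List.range (3 - pre.length)).foldl
    (fun results _ => results.flatMap (fun r => ops.map (fun n => r ++ [n]))) [pre]

-- ===== PRECONDITION & SPEC =====
-- Pre_ excludes over-long prefixes (len(pre) > 3): there A recurses forever
-- (RecursionError) when ops is non-empty, and with empty ops returns [] only as an
-- accident of the empty loop; B returns [pre] there.
def Pre_perm_3_ops (ops : List String) (pre : List String) : Prop := pre.length ≤ 3
instance (ops : List String) (pre : List String) : Decidable (Pre_perm_3_ops ops pre) := by
  unfold Pre_perm_3_ops; infer_instance

def pvWitness_perm_3_ops : List String × List String := (["+", "-"], ["*"])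

def Spec_perm_3_ops (ops : List String) (pre : List String) (out : List (List String)) : Prop :=
  out = perm_3_ops_alt ops pre
instance (ops : List String) (pre : List String) (out : List (List String)) : Decidable (Spec_perm_3_ops ops pre out) := by
  unfold Spec_perm_3_ops; infer_instance

-- ===== CLAIM (what is proved, stated in full; the proofs are below) =====
def Claim_equal_perm_3_ops : Prop := ∀ (ops : List String) (pre : List String), Dom_perm_3_ops ops pre → Pre_perm_3_ops ops pre → Spec_perm_3_ops ops pre (perm_3_ops ops pre)

-- ===== LEMMAS AND PROOFS =====

-- one breadth-first round
def pvStep (ops : List String) (rs : List (List String)) : List (List String) :=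
  rs.flatMap (fun r => ops.map (fun n => r ++ [n]))

lemma pvStep_iterate_flatMap (ops : List String) (k : Nat) (l : List (List String)) :
    (pvStep ops)^[k] l = l.flatMap (fun r => (pvStep ops)^[k] [r]) := by
  induction k generalizing l with
  | zero => simp
  | succ k ih =>
    simp only [Function.iterate_succ_apply]
    rw [ih (pvStep ops l)]
    have h1 : pvStep ops l = l.flatMap (fun r => pvStep ops [r]) := by simp [pvStep]
    rw [h1, List.flatMap_assoc]
    congr 1
    funext r
    exact (ih (pvStep ops [r])).symm

lemma range_foldl_iterate {α : Type} (f : α → α) (n : Nat) (init : α) :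
    (List.range n).foldl (fun s _ => f s) init = f^[n] init := by
  induction n generalizing init with
  | zero => simp
  | succ n ih =>
    rw [List.range_succ, List.foldl_append]
    simp [ih, Function.iterate_succ_apply']

lemma perm3Fuel_eq_iterate (ops : List String) :
    ∀ (fuel : Nat) (pre : List String), pre.length ≤ 3 → 3 - pre.length < fuel →
      perm3Fuel fuel ops pre = (pvStep ops)^[3 - pre.length] [pre] := by
  intro fuel
  induction fuel with
  | zero => intro pre _ h; omega
  | succ fuel ih =>
    intro pre hle hf
    by_cases h3 : pre.length = 3
    · simp [perm3Fuel, h3]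
    · have hlt : pre.length < 3 := lt_of_le_of_ne hle h3
      rw [perm3Fuel]
      simp only [h3, if_false]
      rw [PySem.List.foldl_append_eq_flatMap, List.nil_append]
      have hrec : ∀ n, perm3Fuel fuel ops (pre ++ [n]) =
          (pvStep ops)^[3 - (pre.length + 1)] [pre ++ [n]] := by
        intro n
        have := ih (pre ++ [n]) (by simp; omega) (by simp; omega)
        simpa using this
      have hsucc : 3 - pre.length = (3 - (pre.length + 1)) + 1 := by omega
      rw [hsucc, Function.iterate_succ_apply]
      have hstep : pvStep ops [pre] = ops.map (fun n => pre ++ [n]) := by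
        simp [pvStep]
      rw [hstep, pvStep_iterate_flatMap, List.flatMap_map]
      apply List.flatMap_congr
      intro n _
      exact hrec n

-- ===== VERDICT (by name: the statement is the Claim_ definition above) =====
theorem perm_3_ops_spec : Claim_equal_perm_3_ops := by
  intro ops pre _ hpre
  unfold Spec_perm_3_ops perm_3_ops
  have halt : perm_3_ops_alt ops pre = (pvStep ops)^[3 - pre.length] [pre] :=
    range_foldl_iterate (pvStep ops) (3 - pre.length) [pre]
  rw [halt]
  exact perm3Fuel_eq_iterate ops 4 pre hpre (by omega)
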